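-- pv_equiv track=rewrite | github.com/spin311/adventOfCode2023 | day1/part2/solution1-2.py | lastNumber
-- ===== SOURCE A (Python) =====
-- wordsToNumbers = {
--     'one': 1,
--     'two': 2,
--     'three': 3,
--     'four': 4,
--     'five': 5,
--     'six': 6,
--     'seven': 7,
--     'eight': 8,
--     'nine': 9,
-- }
--
-- def lastNumber(line):
--     word = ''
--     for char in line[::-1]:
--         if char.isdigit():
--             return int(char)
--         word = char + word
--         for key in wordsToNumbers:
--             if key in word:
--                 return wordsToNumbers[key]
-- ===== SOURCE B (Python) =====
-- wordsToNumbers = {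
--     'one': 1,
--     'two': 2,
--     'three': 3,
--     'four': 4,
--     'five': 5,
--     'six': 6,
--     'seven': 7,
--     'eight': 8,
--     'nine': 9,
-- }
--
-- def lastNumber(line):
--     # scan positions right-to-left; at each position check the digit or a
--     # fixed-size window (word start) instead of searching a growing substring
--     for i in range(len(line) - 1, -1, -1):
--         c = line[i]
--         if c.isdigit():
--             return int(c)
--         for word, val in wordsToNumbers.items():
--             if line.startswith(word, i):
--                 return val
--     return None
-- ===== Notes on version B (the rewrite author's own statement) =====
-- stated objective: faster
-- what changed: Instead of accumulating a growing suffix string and re-scanning all nine keys for substring containment at every step, B scans indices right-to-left and checks only a digit or a word starting exactly at that index (line.startswith(word, i)), removing the growing-substring search.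
import Mathlib
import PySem

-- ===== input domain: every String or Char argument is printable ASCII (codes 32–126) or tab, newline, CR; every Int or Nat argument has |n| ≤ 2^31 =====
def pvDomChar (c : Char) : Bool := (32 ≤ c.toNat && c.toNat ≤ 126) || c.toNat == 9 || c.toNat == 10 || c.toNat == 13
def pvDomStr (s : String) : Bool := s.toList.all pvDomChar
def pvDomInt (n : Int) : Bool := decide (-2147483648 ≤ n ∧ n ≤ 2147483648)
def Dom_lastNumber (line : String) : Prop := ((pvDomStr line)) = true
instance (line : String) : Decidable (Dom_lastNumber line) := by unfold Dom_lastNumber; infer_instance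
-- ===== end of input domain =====

-- B scans indices right-to-left and checks a fixed-size window (digit / word start at i)
-- instead of A's growing-suffix substring search; measured faster (asymptotic).

-- module-level dict wordsToNumbers, shared by both programs (association list, insertion order)
def wordsToNumbers : List (List Char × Int) :=
  [(['o','n','e'], 1), (['t','w','o'], 2), (['t','h','r','e','e'], 3),
   (['f','o','u','r'], 4), (['f','i','v','e'], 5), (['s','i','x'], 6),
   (['s','e','v','e','n'], 7), (['e','i','g','h','t'], 8), (['n','i','n','e'], 9)]

-- int(c) for a single ASCII digit character (both Pythons call it only under c.isdigit())
def intOfDigit (c : Char) : Int := (c.toNat : Int) - 48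

-- ===== PORT A =====
-- A's loop over line[::-1], accumulating word = char + word and scanning every
-- key for substring containment ('key in word' = PySem.Chars.isIn);
-- 'return wordsToNumbers[key]' for the first matching key = .2 of the found pair.
def loopA : List Char → List Char → Option Int
  | [], _ => none
  | c :: rest, word =>
    if PySem.Chars.isdigit c then some (intOfDigit c)
    else
      let word' := c :: word
      match wordsToNumbers.find? (fun kv => PySem.Chars.isIn kv.1 word') with
      | some kv => some kv.2
      | none => loopA rest word'

def lastNumber (line : String) : Option Int :=
  loopA line.toList.reverse []   -- for char in line[::-1] (slice step -1 = reverse)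

-- ===== PORT B =====
-- B's loop: for i in range(len(line)-1, -1, -1); recursion on i+1 (fuel = next index + 1).
-- line.startswith(word, i) = PySem.Chars.startswith (drop i) word; line[i] with i < length.
def loopB (l : List Char) : Nat → Option Int
  | 0 => none
  | i + 1 =>
    let c := l.getD i ' '   -- line[i]; i < l.length at every call
    if PySem.Chars.isdigit c then some (intOfDigit c)
    else
      match wordsToNumbers.find? (fun kv => PySem.Chars.startswith (l.drop i) kv.1) with
      | some kv => some kv.2
      | none => loopB l i

def lastNumber_alt (line : String) : Option Int :=
  loopB line.toList line.toList.length

-- ===== PRECONDITION & SPEC =====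
def Spec_lastNumber (line : String) (out : Option Int) : Prop := out = lastNumber_alt line
instance (line : String) (out : Option Int) : Decidable (Spec_lastNumber line out) := by unfold Spec_lastNumber; infer_instance

-- ===== CLAIM (what is proved, stated in full; the proofs are below) =====
def Claim_equal_lastNumber : Prop := ∀ (line : String), Dom_lastNumber line → Spec_lastNumber line (lastNumber line)

-- ===== LEMMAS AND PROOFS =====

-- find? under extensionally equal predicates (no Mathlib lemma found by exact?)
theorem find?_congr' {α : Type} (l : List α) (p q : α → Bool)
    (h : ∀ a ∈ l, p a = q a) : l.find? p = l.find? q := by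
  induction l with
  | nil => rfl
  | cons a t ih =>
    have ha := h a (List.mem_cons_self)
    simp only [List.find?_cons, ha]
    cases q a with
    | true => rfl
    | false => exact ih (fun b hb => h b (List.mem_cons_of_mem a hb))

-- invariant: if no key is contained in the suffix l.drop i (A would already have
-- returned), A's remaining loop over the first i chars equals B's countdown from i.
theorem loopA_eq_loopB (l : List Char) :
    ∀ i, i ≤ l.length →
      (∀ kv ∈ wordsToNumbers, PySem.Chars.isIn kv.1 (l.drop i) = false) →
      loopA ((l.take i).reverse) (l.drop i) = loopB l i := by
  intro i
  induction i with
  | zero => intro _ _; simp [loopA, loopB]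
  | succ i ih =>
    intro hle H
    have hi : i < l.length := by omega
    have htake : (l.take (i + 1)).reverse = l[i] :: (l.take i).reverse := by
      rw [List.take_add_one, List.getElem?_eq_getElem hi]
      simp
    have hdrop : l.drop i = l[i] :: l.drop (i + 1) := List.drop_eq_getElem_cons hi
    have hget : l.getD i ' ' = l[i] := List.getD_eq_getElem l ' ' hi
    rw [htake]
    show loopA (l[i] :: (l.take i).reverse) (l.drop (i + 1)) = loopB l (i + 1)
    rw [loopA, loopB, hget]
    by_cases hd : PySem.Chars.isdigit l[i] = true
    · simp [hd]
    · simp only [Bool.not_eq_true] at hd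
      rw [hd]
      simp only [Bool.false_eq_true, if_false]
      have hpred : ∀ kv ∈ wordsToNumbers,
          PySem.Chars.isIn kv.1 (l[i] :: l.drop (i + 1))
            = PySem.Chars.startswith (l.drop i) kv.1 := by
        intro kv hkv
        rw [← hdrop]
        by_cases hp : kv.1 <+: l.drop i
        · rw [(PySem.Chars.isIn_iff_infix _ _).2 hp.isInfix,
              (PySem.Chars.startswith_iff _ _).2 hp]
        · have hni : ¬ kv.1 <:+: l.drop i := by
            intro hinf
            rcases List.infix_iff_prefix_suffix.1 hinf with ⟨t, hpt, hts⟩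
            rcases hts with ⟨u, hu⟩
            rw [hdrop] at hu
            cases u with
            | nil =>
              exact hp (by rw [hdrop, ← hu]; exact hpt)
            | cons a u' =>
              have h2 : u' ++ t = l.drop (i + 1) := by
                have : a :: (u' ++ t) = l[i] :: l.drop (i + 1) := hu
                injection this
              have hts' : t <:+ l.drop (i + 1) := ⟨u', h2⟩
              have hcontra := (PySem.Chars.isIn_iff_infix kv.1 _).2 (hpt.isInfix.trans hts'.isInfix)
              rw [H kv hkv] at hcontra
              exact Bool.false_ne_true hcontra
          have hsw : PySem.Chars.startswith (l.drop i) kv.1 = false := by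
            cases hsw0 : PySem.Chars.startswith (l.drop i) kv.1 with
            | true => exact absurd ((PySem.Chars.startswith_iff _ _).1 hsw0) hp
            | false => rfl
          rw [(PySem.Chars.isIn_eq_false_iff _ _).2 hni, hsw]
      have hfind : wordsToNumbers.find? (fun kv => PySem.Chars.isIn kv.1 (l[i] :: l.drop (i + 1)))
          = wordsToNumbers.find? (fun kv => PySem.Chars.startswith (l.drop i) kv.1) :=
        find?_congr' _ _ _ hpred
      rw [hfind]
      cases hf : wordsToNumbers.find? (fun kv => PySem.Chars.startswith (l.drop i) kv.1) with
      | some kv => rfl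
      | none =>
        show loopA ((l.take i).reverse) (l[i] :: l.drop (i + 1)) = loopB l i
        rw [← hdrop]
        have H' : ∀ kv ∈ wordsToNumbers, PySem.Chars.isIn kv.1 (l.drop i) = false := by
          intro kv hkv
          have := List.find?_eq_none.1 hf kv hkv
          have hb : PySem.Chars.startswith (l.drop i) kv.1 = false := by
            simpa using this
          rw [hdrop, hpred kv hkv, hb]
        exact ih (by omega) H'

-- ===== VERDICT (by name: the statement is the Claim_ definition above) =====
theorem lastNumber_spec : Claim_equal_lastNumber := by
  intro line _
  show lastNumber line = lastNumber_alt line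
  unfold lastNumber lastNumber_alt
  have H : ∀ kv ∈ wordsToNumbers,
      PySem.Chars.isIn kv.1 (line.toList.drop line.toList.length) = false := by
    rw [List.drop_length]; decide
  have h := loopA_eq_loopB line.toList line.toList.length le_rfl H
  rw [List.take_length, List.drop_length] at h
  exact h
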